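-- pv_equiv track=rewrite | github.com/samuel-kuhn/AoC-25 | Day6/main.py | parse_file_to_2d_list_filled_vertically
-- ===== SOURCE A (Python) =====
-- def parse_file_to_2d_list_filled_vertically(lines: list[str]) -> tuple[list[list[int]], list[str]]:
--     res: list[list[int]] = []
--     ops = [op for op in lines.pop().split(' ') if op != '']
--     num_stack = []
--
--     max_len = max(len(line) for line in lines)
--     padded = [line.ljust(max_len) for line in lines] # ljust pads each line with spaces to match max_len
--
--     for column_index in range(max_len):
--         num_str = ""
--         for row in padded:
--             num_str += row[column_index]
--         if not num_str.isspace():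
--             num_stack.append(int(num_str))
--         else:
--             res.append(num_stack)
--             num_stack = []
--
--     res.append(num_stack)
--     return res, ops
-- ===== SOURCE B (Python) =====
-- def parse_file_to_2d_list_filled_vertically(lines: list[str]) -> tuple[list[list[int]], list[str]]:
--     ops = [op for op in lines.pop().split(' ') if op != '']
--     width = max(len(line) for line in lines)
--
--     def col(i):
--         return ''.join(line[i] if i < len(line) else ' ' for line in lines)
--
--     bounds = [-1] + [i for i in range(width) if col(i).isspace()] + [width]
--     return [[int(col(j)) for j in range(lo + 1, hi)]
--             for lo, hi in zip(bounds, bounds[1:])], ops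
-- ===== Notes on version B (the rewrite author's own statement) =====
-- stated objective: alternative
-- what changed: A makes one fused left-to-right sweep over column indices, rebuilding each column string char by char and flushing a mutable number stack into the result whenever it meets a separator column; B never keeps a stack or pads the lines: it first computes the list of separator-column indices, brackets it with -1 and width as sentinels, and then builds each group directly by slicing the index range between consecutive boundaries, reading each column through an on-demand accessor.
import Mathlib
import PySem

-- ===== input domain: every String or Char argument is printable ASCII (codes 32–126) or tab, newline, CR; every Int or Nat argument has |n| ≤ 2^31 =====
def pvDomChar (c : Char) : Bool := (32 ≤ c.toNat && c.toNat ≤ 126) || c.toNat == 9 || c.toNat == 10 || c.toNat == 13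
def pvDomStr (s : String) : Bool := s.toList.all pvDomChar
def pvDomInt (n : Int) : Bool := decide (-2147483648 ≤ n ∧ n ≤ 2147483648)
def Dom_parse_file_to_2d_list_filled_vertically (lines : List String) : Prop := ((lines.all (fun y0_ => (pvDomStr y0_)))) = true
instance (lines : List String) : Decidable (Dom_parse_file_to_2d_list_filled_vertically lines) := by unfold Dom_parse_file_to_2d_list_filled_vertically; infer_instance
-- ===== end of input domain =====

-- B replaces A's fused left-to-right sweep (per-column string rebuild + flush-on-separator mutable
-- stack) by a boundary computation: it first collects the separator-column indices, brackets them
-- with -1/width sentinels, and builds each group by slicing the index range between consecutive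
-- boundaries, reading columns through an on-demand accessor (no padding, no stack); objective:
-- alternative decomposition. Both the Python A and the Python B pop the last element off `lines`
-- in place (same observable mutation); the theorems are about the return value.

-- ===== PORT A =====
-- line.ljust(w): pad on the right with spaces up to width w (w ≤ len gives the line unchanged)
def pyLjust (cs : List Char) (w : Int) : List Char :=
  cs ++ List.replicate (w.toNat - cs.length) ' '

def parse_file_to_2d_list_filled_vertically (lines : List String) : List (List Int) × List String :=
  match PySem.List.pop? lines (-1) with
  | none => ([], [])          -- lines.pop() raises IndexError on []; excluded by Pre_
  | some (last, rest) =>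
    let ops := ((PySem.Str.split? last " ").getD []).filter (fun op => op != "")  -- sep ≠ "", never none
    match PySem.List.max? (rest.map (fun line => PySem.Str.len line)) (fun x => x) with
    | none => ([], ops)       -- max() over no lines raises ValueError; excluded by Pre_
    | some max_len =>
      let padded := rest.map (fun line => pyLjust line.toList max_len)
      let st := (PySem.List.pyRange 0 max_len 1).foldl
        (fun (st : List (List Int) × List Int) column_index =>
          let num_str := padded.foldl (fun s row =>
              match PySem.List.pyGet? row column_index with -- row[column_index], always in range here
              | some ch => s ++ [ch]
              | none => s) ([] : List Char)
          if PySem.Chars.strIsspace num_str = false then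
            match PySem.Int.ofChars? num_str with
            | some n => (st.1, st.2 ++ [n])
            | none => st      -- int(num_str) raises ValueError; excluded by Pre_
          else (st.1 ++ [st.2], ([] : List Int)))
        (([], []) : List (List Int) × List Int)
      (st.1 ++ [st.2], ops)

-- ===== PORT B =====
-- the helper col(i) of Source B: line[i] if i < len(line) else ' ', joined over the body lines
def colStr (body : List String) (i : Int) : List Char :=
  body.map (fun line => if i < PySem.Str.len line then line.toList.getD i.toNat ' ' else ' ')

def parse_file_to_2d_list_filled_vertically_alt (lines : List String) : List (List Int) × List String :=
  match PySem.List.pop? lines (-1) with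
  | none => ([], [])          -- lines.pop() raises IndexError on []; excluded by Pre_
  | some (last, rest) =>
    let ops := ((PySem.Str.split? last " ").getD []).filter (fun op => op != "")  -- sep ≠ "", never none
    match PySem.List.max? (rest.map (fun line => PySem.Str.len line)) (fun x => x) with
    | none => ([], ops)       -- max() over no lines raises ValueError; excluded by Pre_
    | some width =>
      let bounds : List Int :=
        -1 :: ((PySem.List.pyRange 0 width 1).filter
                 (fun i => PySem.Chars.strIsspace (colStr rest i)) ++ [width])
      ((bounds.zip bounds.tail).map (fun lohi =>
          (PySem.List.pyRange (lohi.1 + 1) lohi.2 1).map (fun j =>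
            (PySem.Int.ofChars? (colStr rest j)).getD 0)),  -- int() raising is excluded by Pre_
       ops)

-- ===== PRECONDITION & SPEC =====
-- the i-th vertical column of the body (space-padded reading)
def pvColumn (body : List String) (i : Nat) : List Char :=
  body.map (fun l => l.toList.getD i ' ')

-- Pre_ excludes exactly the inputs on which the Python A raises: fewer than two lines
-- (lines.pop() IndexError / max() over an empty sequence ValueError), and bodies in which some
-- non-all-space vertical column is not a valid int literal (int() ValueError).
def Pre_parse_file_to_2d_list_filled_vertically (lines : List String) : Prop :=
  2 ≤ lines.length ∧
  ∀ i < ((lines.dropLast.map (fun l => l.toList.length)).foldl max 0),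
    PySem.Chars.strIsspace (pvColumn lines.dropLast i) = false →
      (PySem.Int.ofChars? (pvColumn lines.dropLast i)).isSome
instance (lines : List String) : Decidable (Pre_parse_file_to_2d_list_filled_vertically lines) := by
  unfold Pre_parse_file_to_2d_list_filled_vertically; infer_instance

def pvWitness_parse_file_to_2d_list_filled_vertically : List String := ["1 2", "3 4", "+ *"]

def Spec_parse_file_to_2d_list_filled_vertically (lines : List String) (out : List (List Int) × List String) : Prop := out = parse_file_to_2d_list_filled_vertically_alt lines
instance (lines : List String) (out : List (List Int) × List String) : Decidable (Spec_parse_file_to_2d_list_filled_vertically lines out) := by unfold Spec_parse_file_to_2d_list_filled_vertically; infer_instance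

-- ===== CLAIM (what is proved, stated in full; the proofs are below) =====
def Claim_equal_parse_file_to_2d_list_filled_vertically : Prop := ∀ (lines : List String), Dom_parse_file_to_2d_list_filled_vertically lines → Pre_parse_file_to_2d_list_filled_vertically lines → Spec_parse_file_to_2d_list_filled_vertically lines (parse_file_to_2d_list_filled_vertically lines)

-- ===== LEMMAS AND PROOFS =====

-- proof-only functional description of the grouping: split the column list on all-space columns,
-- converting the kept columns to ints
def specGroups : List (List Char) → List (List Int)
  | [] => [[]]
  | c :: rest =>
    if PySem.Chars.strIsspace c then [] :: specGroups rest
    else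
      match specGroups rest with
      | g :: gs => (((PySem.Int.ofChars? c).getD 0) :: g) :: gs
      | [] => [[(PySem.Int.ofChars? c).getD 0]]

theorem specGroups_ne_nil (cols : List (List Char)) : specGroups cols ≠ [] := by
  cases cols with
  | nil => simp [specGroups]
  | cons c rest =>
    simp only [specGroups]
    split_ifs
    · simp
    · cases h : specGroups rest <;> simp

theorem getD_pyLjust (cs : List Char) (w : Int) (i : Nat) :
    (pyLjust cs w).getD i ' ' = cs.getD i ' ' := by
  unfold pyLjust
  by_cases h : i < cs.length
  · rw [List.getD_append _ _ _ _ h]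
  · simp [List.getD_eq_getElem?_getD, List.getElem?_append, h]

theorem length_pyLjust (cs : List Char) (w : Int) (h : cs.length ≤ w.toNat) :
    (pyLjust cs w).length = w.toNat := by
  simp [pyLjust]; omega

theorem le_foldl_max_init (ns : List Nat) (b : Nat) : b ≤ ns.foldl max b := by
  induction ns generalizing b with
  | nil => simp
  | cons n ns ih => exact le_trans (le_max_left b n) (ih (max b n))

theorem le_foldl_max_nat (ns : List Nat) (b a : Nat) (ha : a ∈ ns) : a ≤ ns.foldl max b := by
  induction ns generalizing b with
  | nil => simp at ha
  | cons n ns ih =>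
    simp only [List.foldl_cons]
    rcases List.mem_cons.mp ha with h | h
    · subst h; exact le_trans (le_max_right b a) (le_foldl_max_init ns (max b a))
    · exact ih (max b n) h

theorem numstr_eq (rows : List (List Char)) (n k : Nat) (hk : k < n)
    (hlen : ∀ r ∈ rows, r.length = n) (init : List Char) :
    rows.foldl (fun s row => match PySem.List.pyGet? row (k : Int) with
      | some ch => s ++ [ch] | none => s) init
    = init ++ rows.map (fun r => r.getD k ' ') := by
  induction rows generalizing init with
  | nil => simp
  | cons r rs ih =>
    have hr : r.length = n := hlen r (by simp)
    have hget : PySem.List.pyGet? r (k : Int) = some (r.getD k ' ') := by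
      rw [PySem.List.pyGet?_natCast, List.getElem?_eq_getElem (by omega),
        List.getD_eq_getElem r ' ' (by omega)]
    simp only [List.foldl_cons, hget, List.map_cons]
    rw [ih (fun r h => hlen r (by simp [h])) (init ++ [r.getD k ' '])]
    simp

theorem foldA_eq (cols : List (List Char)) (res : List (List Int)) (stack : List Int)
    (h : ∀ c ∈ cols, PySem.Chars.strIsspace c = false → (PySem.Int.ofChars? c).isSome) :
    (cols.foldl (fun (st : List (List Int) × List Int) c =>
        if PySem.Chars.strIsspace c = false then
          match PySem.Int.ofChars? c with
          | some n => (st.1, st.2 ++ [n])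
          | none => st
        else (st.1 ++ [st.2], ([] : List Int))) (res, stack)).1
      ++ [(cols.foldl (fun (st : List (List Int) × List Int) c =>
        if PySem.Chars.strIsspace c = false then
          match PySem.Int.ofChars? c with
          | some n => (st.1, st.2 ++ [n])
          | none => st
        else (st.1 ++ [st.2], ([] : List Int))) (res, stack)).2]
    = res ++ (match specGroups cols with
        | g :: gs => (stack ++ g) :: gs
        | [] => [stack]) := by
  induction cols generalizing res stack with
  | nil => simp [specGroups]
  | cons c cs ih =>
    simp only [List.foldl_cons, specGroups]
    by_cases hs : PySem.Chars.strIsspace c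
    · rw [if_neg (by simp [hs]), if_pos hs]
      rw [ih (res ++ [stack]) [] (fun c hc => h c (List.mem_cons_of_mem _ hc))]
      obtain ⟨g, gs, heq⟩ : ∃ g gs, specGroups cs = g :: gs := by
        cases hh : specGroups cs with
        | nil => exact absurd hh (specGroups_ne_nil cs)
        | cons g gs => exact ⟨g, gs, rfl⟩
      rw [heq]
      simp
    · have hv := h c List.mem_cons_self (by simp [hs])
      obtain ⟨v, hv⟩ := Option.isSome_iff_exists.mp hv
      rw [if_pos (by simp [hs]), hv]
      rw [ih res (stack ++ [v]) (fun c hc => h c (List.mem_cons_of_mem _ hc))]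
      cases hh : specGroups cs with
      | nil => exact absurd hh (specGroups_ne_nil cs)
      | cons g gs => simp [hs]

-- ===== B-side machinery: boundary slicing over Nat indices =====

-- the groups B builds, in Nat coordinates: one slice of indices per (start, end) boundary pair
def natGroups (g : Nat → Int) (starts ends : List Nat) : List (List Int) :=
  (starts.zip ends).map (fun ab => (List.range' ab.1 (ab.2 - ab.1)).map g)

-- the separator-column indices of a column list
def sepsOf (cs : List (List Char)) : List Nat :=
  (List.range cs.length).filter (fun i => PySem.Chars.strIsspace (cs.getD i []))

theorem map_range'_succ (g : Nat → Int) (a n : Nat) :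
    (List.range' (a+1) n).map g = (List.range' a n).map (fun j => g (j+1)) := by
  induction n generalizing a with
  | zero => simp
  | succ n ih => simp only [List.range'_succ, List.map_cons, ih]

theorem natGroups_shift (g : Nat → Int) (S E : List Nat) :
    natGroups g (S.map (· + 1)) (E.map (· + 1)) = natGroups (fun j => g (j+1)) S E := by
  unfold natGroups
  rw [List.zip_map, List.map_map]
  apply List.map_congr_left
  intro ab _
  have h1 : ab.2 + 1 - (ab.1 + 1) = ab.2 - ab.1 := by omega
  simp only [Function.comp, Prod.map, h1, map_range'_succ]

theorem sepsOf_cons (c : List Char) (r : List (List Char)) :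
    sepsOf (c :: r)
      = (if PySem.Chars.strIsspace c then [0] else []) ++ (sepsOf r).map (· + 1) := by
  unfold sepsOf
  rw [List.length_cons, List.range_succ_eq_map, List.filter_cons, List.filter_map]
  have hcomp : ((fun i => PySem.Chars.strIsspace ((c :: r).getD i [])) ∘ Nat.succ)
      = (fun i => PySem.Chars.strIsspace (r.getD i [])) := by
    funext i
    simp only [Function.comp_apply, Nat.succ_eq_add_one, List.getD_cons_succ]
  rw [hcomp]
  simp only [List.getD_cons_zero]
  split_ifs <;> simp

theorem natGroups_cons (g : Nat → Int) (a e : Nat) (T E : List Nat) :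
    natGroups g (a :: T) (e :: E)
      = (List.range' a (e - a)).map g :: natGroups g T E := by
  simp [natGroups]

theorem boundary_eq (cs : List (List Char)) :
    natGroups (fun j => (PySem.Int.ofChars? (cs.getD j [])).getD 0)
      (0 :: (sepsOf cs).map (· + 1)) (sepsOf cs ++ [cs.length]) = specGroups cs := by
  induction cs with
  | nil => simp [sepsOf, natGroups, specGroups]
  | cons c r ih =>
    have hfun : (fun j => (PySem.Int.ofChars? ((c :: r).getD (j+1) [])).getD 0)
        = (fun j => (PySem.Int.ofChars? (r.getD j [])).getD 0) := by
      funext j; rw [List.getD_cons_succ]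
    rw [sepsOf_cons]
    by_cases hc : PySem.Chars.strIsspace c
    · rw [if_pos hc]
      have hstarts : (0 :: (([0] ++ (sepsOf r).map (· + 1))).map (· + 1))
          = 0 :: ((0 :: (sepsOf r).map (· + 1)).map (· + 1)) := by simp
      have hends : ([0] ++ (sepsOf r).map (· + 1)) ++ [(c :: r).length]
          = 0 :: (((sepsOf r) ++ [r.length]).map (· + 1)) := by simp
      rw [hstarts, hends]
      have hcons := natGroups_cons
        (fun j => (PySem.Int.ofChars? ((c :: r).getD j [])).getD 0)
        0 0 ((0 :: (sepsOf r).map (· + 1)).map (· + 1)) (((sepsOf r) ++ [r.length]).map (· + 1))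
      rw [hcons, natGroups_shift, hfun, ih]
      simp [specGroups, hc]
    · rw [if_neg hc, List.nil_append]
      cases hS : sepsOf r with
      | nil =>
        rw [hS] at ih
        simp only [List.map_nil, List.nil_append, List.length_cons]
        have h0 : natGroups (fun j => (PySem.Int.ofChars? (r.getD j [])).getD 0) [0] [r.length]
            = specGroups r := by simpa using ih
        have h1 : natGroups (fun j => (PySem.Int.ofChars? ((c :: r).getD j [])).getD 0)
            [0] [r.length + 1]
            = [(List.range' 0 (r.length + 1)).map
                (fun j => (PySem.Int.ofChars? ((c :: r).getD j [])).getD 0)] := by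
          simp [natGroups]
        rw [h1]
        have h2 : (List.range' 0 (r.length + 1)).map
              (fun j => (PySem.Int.ofChars? ((c :: r).getD j [])).getD 0)
            = (PySem.Int.ofChars? c).getD 0
              :: (List.range' 0 r.length).map
                   (fun j => (PySem.Int.ofChars? (r.getD j [])).getD 0) := by
          rw [List.range'_succ, List.map_cons, map_range'_succ, hfun]
          rfl
        rw [h2]
        have h3 : specGroups r = [(List.range' 0 r.length).map
            (fun j => (PySem.Int.ofChars? (r.getD j [])).getD 0)] := by
          rw [← h0]; simp [natGroups]
        simp [specGroups, hc, h3]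
      | cons s S' =>
        rw [hS] at ih
        -- ih : natGroups f_r (0 :: (s+1) :: S'.map(+1)) (s :: (S' ++ [r.length])) = specGroups r
        simp only [List.map_cons, List.cons_append] at ih
        rw [natGroups_cons] at ih
        simp only [Nat.sub_zero] at ih
        -- decompose our goal
        simp only [List.map_cons, List.cons_append, List.length_cons]
        rw [natGroups_cons]
        simp only [Nat.sub_zero]
        have htail : ((S'.map (· + 1)).map (· + 1)) ++ [] = (S'.map (· + 1)).map (· + 1) := by simp
        have hshift : natGroups (fun j => (PySem.Int.ofChars? ((c :: r).getD j [])).getD 0)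
              ((s + 1 + 1) :: (S'.map (· + 1)).map (· + 1)) (S'.map (· + 1) ++ [r.length + 1])
            = natGroups (fun j => (PySem.Int.ofChars? (r.getD j [])).getD 0)
              ((s + 1) :: S'.map (· + 1)) (S' ++ [r.length]) := by
          have e1 : (s + 1 + 1) :: (S'.map (· + 1)).map (· + 1)
              = ((s + 1) :: S'.map (· + 1)).map (· + 1) := by simp
          have e2 : S'.map (· + 1) ++ [r.length + 1] = (S' ++ [r.length]).map (· + 1) := by simp
          rw [e1, e2, natGroups_shift, hfun]
        rw [hshift]
        have hhead : (List.range' 0 (s + 1)).map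
              (fun j => (PySem.Int.ofChars? ((c :: r).getD j [])).getD 0)
            = (PySem.Int.ofChars? c).getD 0
              :: (List.range' 0 s).map (fun j => (PySem.Int.ofChars? (r.getD j [])).getD 0) := by
          rw [List.range'_succ, List.map_cons, map_range'_succ, hfun]
          rfl
        rw [hhead]
        simp only [specGroups, hc, ← ih]
        rfl

theorem natGroups_congr (g₁ g₂ : Nat → Int) (w : Nat) (starts ends : List Nat)
    (hends : ∀ e ∈ ends, e ≤ w) (hg : ∀ k < w, g₁ k = g₂ k) :
    natGroups g₁ starts ends = natGroups g₂ starts ends := by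
  unfold natGroups
  apply List.map_congr_left
  intro ab hab
  apply List.map_congr_left
  intro k hk
  rw [List.mem_range'] at hk
  obtain ⟨i, hi, rfl⟩ := hk
  have hb : ab.2 ∈ ends := (List.of_mem_zip hab).2
  exact hg _ (by have := hends ab.2 hb; omega)

-- pyRange over Int boundaries, rewritten to Nat coordinates
theorem groupCell (a : Int) (ha : 0 ≤ a) (b : Nat) (F : Int → Int) :
    (PySem.List.pyRange a (b : Int) 1).map F
      = (List.range' a.toNat (b - a.toNat)).map (fun k : Nat => F (k : Int)) := by
  rw [PySem.List.pyRange_one, List.map_map, List.range'_eq_map_range, List.map_map]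
  have hn : ((b : Int) - a).toNat = b - a.toNat := by omega
  rw [hn]
  apply List.map_congr_left
  intro k hk
  simp only [Function.comp_apply]
  congr 1
  omega

-- Source B's pair loop over [-1] + seps + [w], in Int coordinates, equals natGroups
theorem pairsI (F : Int → Int) (w : Nat) (h : List Nat) (prev : Int) (hprev : 0 ≤ prev + 1) :
    (((prev :: (h.map (Nat.cast) ++ [(w : Int)])).zip (h.map Nat.cast ++ [(w : Int)])).map
        (fun lohi => (PySem.List.pyRange (lohi.1 + 1) lohi.2 1).map F))
      = natGroups (fun k => F (k : Int)) ((prev + 1).toNat :: h.map (· + 1)) (h ++ [w]) := by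
  induction h generalizing prev with
  | nil =>
    simp only [List.map_nil, List.nil_append, List.zip_cons_cons, List.zip_nil_right,
      List.map_cons, List.map_nil, natGroups]
    rw [groupCell (prev + 1) hprev w F]
  | cons s t ih =>
    simp only [List.map_cons, List.cons_append, List.zip_cons_cons, List.map_cons]
    rw [natGroups_cons, groupCell (prev + 1) hprev s F,
      ih (s : Int) (by positivity)]
    have hs : ((s : Int) + 1).toNat = s + 1 := by omega
    rw [hs]

-- Source B's col(i) at a Nat index is the space-padded column
theorem colStr_cast (body : List String) (k : Nat) :
    colStr body ((k : Nat) : Int) = pvColumn body k := by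
  unfold colStr pvColumn
  apply List.map_congr_left
  intro line _
  by_cases h : k < line.toList.length
  · rw [if_pos (by rw [PySem.Str.len_eq]; exact_mod_cast h)]
    simp
  · rw [if_neg (by rw [PySem.Str.len_eq]; omega)]
    rw [List.getD_eq_default _ _ (by omega)]

-- ===== VERDICT (by name: the statement is the Claim_ definition above) =====
theorem parse_file_to_2d_list_filled_vertically_spec : Claim_equal_parse_file_to_2d_list_filled_vertically := by
  intro lines _hdom hpre
  obtain ⟨hlen2, hcols⟩ := hpre
  unfold Spec_parse_file_to_2d_list_filled_vertically
  rcases List.eq_nil_or_concat lines with rfl | ⟨ys, y, rfl⟩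
  · simp at hlen2
  · rw [List.concat_eq_append] at hlen2 hcols ⊢
    have hdrop : (ys ++ [y]).dropLast = ys := by simp
    rw [hdrop] at hcols
    simp only [parse_file_to_2d_list_filled_vertically,
      parse_file_to_2d_list_filled_vertically_alt, PySem.List.pop?_last]
    cases hmax : PySem.List.max? (ys.map (fun line => PySem.Str.len line)) (fun x => x) with
    | none => rfl
    | some m =>
      simp only []
      have hys : ys ≠ [] := by
        intro h; subst h; simp at hlen2
      obtain ⟨l0, hl0, hml0⟩ := List.mem_map.mp (PySem.List.max?_mem hmax)
      have hm0 : 0 ≤ m := by rw [← hml0, PySem.Str.len_eq]; positivity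
      have hcast : m = ((m.toNat : Nat) : Int) := (Int.toNat_of_nonneg hm0).symm
      have hmax_each : ∀ l ∈ ys, l.toList.length ≤ m.toNat := by
        intro l hl
        have := PySem.List.max?_isMax hmax _ (List.mem_map_of_mem hl)
        rw [PySem.Str.len_eq] at this
        omega
      have hpadlen : ∀ r ∈ ys.map (fun line => pyLjust line.toList m), r.length = m.toNat := by
        intro r hr
        obtain ⟨l, hl, rfl⟩ := List.mem_map.mp hr
        exact length_pyLjust _ _ (hmax_each l hl)
      have hcolsEq : ∀ k : Nat,
          (ys.map (fun line => pyLjust line.toList m)).map (fun r => r.getD k ' ')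
            = pvColumn ys k := by
        intro k
        rw [List.map_map]
        apply List.map_congr_left
        intro l _
        exact getD_pyLjust l.toList m k
      have hW : m.toNat ≤ (ys.map (fun l => l.toList.length)).foldl max 0 := by
        have : l0.toList.length ∈ ys.map (fun l => l.toList.length) :=
          List.mem_map_of_mem hl0
        have h1 := le_foldl_max_nat _ 0 _ this
        rw [PySem.Str.len_eq] at hml0
        omega
      have hc : ∀ c ∈ (List.range m.toNat).map (pvColumn ys),
          PySem.Chars.strIsspace c = false → (PySem.Int.ofChars? c).isSome := by
        intro c hc hsp
        obtain ⟨k, hk, rfl⟩ := List.mem_map.mp hc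
        rw [List.mem_range] at hk
        have := hcols k (by simpa using lt_of_lt_of_le hk hW)
        simpa using this hsp
      have hgetD : ∀ k < m.toNat,
          ((List.range m.toNat).map (pvColumn ys)).getD k [] = pvColumn ys k := by
        intro k hk
        simp [List.getD_eq_getElem?_getD, hk]
      have hlencols : ((List.range m.toNat).map (pvColumn ys)).length = m.toNat := by simp
      -- both sides: convert range(max_len) to Nat coordinates
      have hrange := PySem.List.pyRange_zero_nat m.toNat
      rw [← hcast] at hrange
      rw [hrange, List.foldl_map]
      -- A side: the rebuilt column string is the padded column
      rw [PySem.List.foldl_congr_mem (List.range m.toNat) _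
        (fun (st : List (List Int) × List Int) k =>
          if PySem.Chars.strIsspace (pvColumn ys k) = false then
            match PySem.Int.ofChars? (pvColumn ys k) with
            | some n => (st.1, st.2 ++ [n])
            | none => st
          else (st.1 ++ [st.2], ([] : List Int))) (([], []))
        (by
          intro acc k hk
          rw [List.mem_range] at hk
          rw [numstr_eq _ m.toNat k hk hpadlen []]
          rw [List.nil_append, hcolsEq k])]
      have hA := foldA_eq ((List.range m.toNat).map (pvColumn ys)) [] [] hc
      rw [List.foldl_map] at hA
      rw [hA]
      -- B side: the filtered indices are the separator columns
      have hfilter : ((List.range m.toNat).map (fun k : Nat => (k : Int))).filter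
            (fun i => PySem.Chars.strIsspace (colStr ys i))
          = (sepsOf ((List.range m.toNat).map (pvColumn ys))).map (Nat.cast) := by
        unfold sepsOf
        rw [hlencols, List.filter_map]
        congr 1
        apply List.filter_congr
        intro k hk
        rw [List.mem_range] at hk
        simp only [Function.comp_apply, colStr_cast, hgetD k hk]
      rw [List.tail_cons, hfilter]
      -- B side: the boundary pairs are natGroups over the separator indices
      have hpairs := pairsI (fun j => (PySem.Int.ofChars? (colStr ys j)).getD 0) m.toNat
        (sepsOf ((List.range m.toNat).map (pvColumn ys))) (-1) (by norm_num)
      rw [← hcast] at hpairs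
      have h0 : ((-1 : Int) + 1).toNat = 0 := by norm_num
      rw [h0] at hpairs
      rw [hpairs]
      -- change the cell function from the Int accessor to the column list
      have hends : ∀ e ∈ sepsOf ((List.range m.toNat).map (pvColumn ys)) ++ [m.toNat],
          e ≤ m.toNat := by
        intro e he
        rcases List.mem_append.mp he with he | he
        · unfold sepsOf at he
          rw [hlencols] at he
          have := List.mem_range.mp (List.mem_of_mem_filter he)
          omega
        · simp at he; omega
      rw [natGroups_congr (fun k => (PySem.Int.ofChars? (colStr ys ((k : Nat) : Int))).getD 0)
        (fun j => (PySem.Int.ofChars?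
            (((List.range m.toNat).map (pvColumn ys)).getD j [])).getD 0)
        m.toNat _ _ hends
        (by
          intro k hk
          simp only [colStr_cast, hgetD k hk])]
      have hb := boundary_eq ((List.range m.toNat).map (pvColumn ys))
      rw [hlencols] at hb
      rw [hb]
      -- both sides are now specGroups of the same column list
      cases hh : specGroups ((List.range m.toNat).map (pvColumn ys)) with
      | nil => exact absurd hh (specGroups_ne_nil _)
      | cons g gs => simp
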